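-- pv_equiv track=rewrite | github.com/megagnom111/kursovaya3 | algorythm.py | get_max_weight_mask
-- ===== SOURCE A (Python) =====
-- def get_max_weight_mask(coeffs: list[int]) -> int:
--     """
--     Находит среди наборов с коэффициентом 1:
--     - сначала с максимальным весом (количеством единиц)
--     - затем лексикографически наибольший (по числовому значению маски)
--     """
--     max_weight = -1
--     best_mask = 0
--
--     for mask, c in enumerate(coeffs):
--         if c == 0:
--             continue
--         w = bin(mask).count('1')
--         if w > max_weight or (w == max_weight and mask > best_mask):
--             max_weight = w
--             best_mask = mask
--     return best_mask
-- ===== SOURCE B (Python) =====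
-- def get_max_weight_mask(coeffs: list[int]) -> int:
--     # Two separate passes: first find the winning weight, then the largest mask at that weight.
--     nonzero = [mask for mask, c in enumerate(coeffs) if c != 0]
--     if not nonzero:
--         return 0
--     target = max(bin(m).count('1') for m in nonzero)
--     return max(m for m in nonzero if bin(m).count('1') == target)
-- ===== Notes on version B (the rewrite author's own statement) =====
-- stated objective: alternative
-- what changed: Replaces A's single fold carrying a (max_weight, best_mask) pair with two separate passes: first compute the maximum popcount over nonzero-coefficient indices, then take the maximum index among those attaining it (0 when no nonzero coefficient).
import Mathlib
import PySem

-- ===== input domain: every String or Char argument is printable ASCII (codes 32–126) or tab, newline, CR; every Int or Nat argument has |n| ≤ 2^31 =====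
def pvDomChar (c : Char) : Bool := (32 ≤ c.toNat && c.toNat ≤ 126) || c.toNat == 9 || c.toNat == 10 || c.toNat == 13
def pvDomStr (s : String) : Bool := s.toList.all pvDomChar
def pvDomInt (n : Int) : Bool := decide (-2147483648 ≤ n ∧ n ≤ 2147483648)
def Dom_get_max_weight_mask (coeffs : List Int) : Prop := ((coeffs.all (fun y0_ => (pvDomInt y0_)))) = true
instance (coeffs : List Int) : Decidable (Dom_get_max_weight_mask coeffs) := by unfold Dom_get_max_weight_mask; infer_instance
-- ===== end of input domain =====

-- B replaces A's single fold carrying (max_weight, best_mask) by two separate passes: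
-- max popcount over nonzero-coefficient indices, then max index attaining it (objective: alternative).

-- ===== PORT A =====
-- bin(mask).count('1') for mask ≥ 0 (enumerate indices are ≥ 0): exact popcount
def pvPopcount (n : Nat) : Int :=
  if n = 0 then 0 else (n % 2 : Nat) + pvPopcount (n / 2)
decreasing_by exact Nat.div_lt_self (Nat.pos_of_ne_zero (by assumption)) (by omega)

def pvPc (m : Int) : Int := pvPopcount m.toNat

-- loop body of A
def pvStepA (st : Int × Int) (p : Int × Int) : Int × Int :=
  if p.2 = 0 then st
  else
    let w := pvPc p.1
    if w > st.1 ∨ (w = st.1 ∧ p.1 > st.2) then (w, p.1) else st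

def get_max_weight_mask (coeffs : List Int) : Int :=
  ((PySem.List.enumerate coeffs 0).foldl pvStepA ((-1 : Int), (0 : Int))).2

-- ===== PORT B =====
-- max(x :: xs) as Python's running-max loop
def pvMaxInt (x : Int) (xs : List Int) : Int := xs.foldl max x

-- second pass: max index among those whose popcount equals the target weight
-- (the [] branch is unreachable — some element attains the maximal weight — 0 is arbitrary)
def pvBst (L : List Int) (t : Int) : Int :=
  match L.filter (fun m => pvPc m == t) with
  | [] => 0
  | c0 :: cs => pvMaxInt c0 cs

def get_max_weight_mask_alt (coeffs : List Int) : Int :=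
  let nonzero : List Int :=
    (PySem.List.enumerate coeffs 0).filterMap (fun p => if p.2 ≠ 0 then some p.1 else none)
  match nonzero with
  | [] => 0
  | m0 :: rest =>
    let target := pvMaxInt (pvPc m0) (rest.map pvPc)
    pvBst (m0 :: rest) target

-- ===== PRECONDITION & SPEC =====
def Spec_get_max_weight_mask (coeffs : List Int) (out : Int) : Prop := out = get_max_weight_mask_alt coeffs
instance (coeffs : List Int) (out : Int) : Decidable (Spec_get_max_weight_mask coeffs out) := by unfold Spec_get_max_weight_mask; infer_instance

-- ===== CLAIM (what is proved, stated in full; the proofs are below) =====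
def Claim_equal_get_max_weight_mask : Prop := ∀ (coeffs : List Int), Dom_get_max_weight_mask coeffs → Spec_get_max_weight_mask coeffs (get_max_weight_mask coeffs)

-- ===== LEMMAS AND PROOFS =====

-- the fold over nonzero indices only (proof-side restatement of A's loop)
def pvStepNZ (st : Int × Int) (m : Int) : Int × Int :=
  if pvPc m > st.1 ∨ (pvPc m = st.1 ∧ m > st.2) then (pvPc m, m) else st

-- target weight of a nonempty index list (proof-side)
def pvTgt : List Int → Int
  | [] => -1
  | m0 :: rest => pvMaxInt (pvPc m0) (rest.map pvPc)

theorem pvPopcount_nonneg (n : Nat) : 0 ≤ pvPopcount n := by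
  fun_induction pvPopcount with
  | case1 => simp
  | case2 n h ih => positivity

theorem pvPc_nonneg (m : Int) : 0 ≤ pvPc m := pvPopcount_nonneg _

theorem pvMaxInt_le (x : Int) (xs : List Int) : ∀ y ∈ x :: xs, y ≤ pvMaxInt x xs := by
  induction xs generalizing x with
  | nil => simp [pvMaxInt]
  | cons a t ih =>
    intro y hy
    have e : pvMaxInt x (a :: t) = pvMaxInt (max x a) t := by simp [pvMaxInt]
    rw [e]
    simp only [List.mem_cons] at hy
    rcases hy with rfl | rfl | hy
    · exact le_trans (le_max_left y a) (ih (max y a) _ (List.mem_cons_self))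
    · exact le_trans (le_max_right x y) (ih (max x y) _ (List.mem_cons_self))
    · exact ih (max x a) y (List.mem_cons_of_mem _ hy)

theorem pvMaxInt_mem (x : Int) (xs : List Int) : pvMaxInt x xs ∈ x :: xs := by
  induction xs generalizing x with
  | nil => simp [pvMaxInt]
  | cons a t ih =>
    have h := ih (max x a)
    have e : pvMaxInt x (a :: t) = pvMaxInt (max x a) t := by simp [pvMaxInt]
    rw [e]
    rcases List.mem_cons.mp h with h' | h'
    · rcases max_choice x a with hm | hm
      · rw [h', hm]; exact List.mem_cons_self
      · rw [h', hm]; simp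
    · simp [h']

theorem pvMaxInt_append (x : Int) (xs : List Int) (m : Int) :
    pvMaxInt x (xs ++ [m]) = max (pvMaxInt x xs) m := by
  simp [pvMaxInt]

theorem pvTgt_le {L : List Int} {y : Int} (hy : y ∈ L) : pvPc y ≤ pvTgt L := by
  cases L with
  | nil => simp at hy
  | cons m0 rest =>
    apply pvMaxInt_le
    rcases List.mem_cons.mp hy with rfl | h
    · simp
    · simp only [List.mem_cons]
      right; exact List.mem_map_of_mem h

theorem pvTgt_attained {L : List Int} (h : L ≠ []) : ∃ y ∈ L, pvPc y = pvTgt L := by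
  cases L with
  | nil => exact absurd rfl h
  | cons m0 rest =>
    have hmem := pvMaxInt_mem (pvPc m0) (rest.map pvPc)
    rcases List.mem_cons.mp hmem with h' | h'
    · exact ⟨m0, by simp, h'.symm⟩
    · rcases List.mem_map.mp h' with ⟨y, hy, hyv⟩
      exact ⟨y, by simp [hy], by simp [pvTgt, hyv]⟩

theorem pvTgt_append (m0 : Int) (rest : List Int) (m : Int) :
    pvTgt ((m0 :: rest) ++ [m]) = max (pvTgt (m0 :: rest)) (pvPc m) := by
  simp [pvTgt, pvMaxInt]

theorem pvBst_mem {L : List Int} {t : Int} (h : ∃ y ∈ L, pvPc y = t) :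
    pvBst L t ∈ L ∧ pvPc (pvBst L t) = t := by
  rcases h with ⟨y, hy, hyt⟩
  have hfy : y ∈ L.filter (fun m => pvPc m == t) := by
    simp [List.mem_filter, hy, hyt]
  unfold pvBst
  cases hf : L.filter (fun m => pvPc m == t) with
  | nil => rw [hf] at hfy; simp at hfy
  | cons c0 cs =>
    have hm := pvMaxInt_mem c0 cs
    rw [← hf] at hm
    have := List.mem_filter.mp hm
    exact ⟨this.1, by simpa using this.2⟩

theorem pvBst_append_eq (L : List Int) (m : Int) {t : Int} (hm : pvPc m = t)
    (h : ∀ y ∈ L, y < m) : pvBst (L ++ [m]) t = m := by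
  unfold pvBst
  rw [List.filter_append]
  have hfm : List.filter (fun m => pvPc m == t) [m] = [m] := by simp [hm]
  rw [hfm]
  cases hf : L.filter (fun m => pvPc m == t) with
  | nil => simp [pvMaxInt]
  | cons c0 cs =>
    simp only [List.cons_append, pvMaxInt_append]
    have : pvMaxInt c0 cs ∈ L := by
      have := pvMaxInt_mem c0 cs
      rw [← hf] at this
      exact (List.mem_filter.mp this).1
    have := h _ this
    change max (pvMaxInt c0 cs) m = m
    omega

theorem pvBst_append_ne (L : List Int) (m : Int) {t : Int} (hm : pvPc m ≠ t) :
    pvBst (L ++ [m]) t = pvBst L t := by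
  unfold pvBst
  rw [List.filter_append]
  have : List.filter (fun m => pvPc m == t) [m] = [] := by simp [hm]
  simp [this]

-- A's fold ignores zero coefficients and otherwise only uses the index
theorem foldA_eq_foldNZ (l : List (Int × Int)) (s : Int × Int) :
    l.foldl pvStepA s = (l.filterMap (fun p => if p.2 ≠ 0 then some p.1 else none)).foldl pvStepNZ s := by
  induction l generalizing s with
  | nil => rfl
  | cons p l ih =>
    by_cases hp : p.2 = 0
    · simp [List.foldl_cons, hp, pvStepA, ih]
    · simp only [List.foldl_cons, List.filterMap_cons, if_pos (by simp [hp] : p.2 ≠ 0)]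
      rw [ih]
      congr 1
      simp [pvStepA, pvStepNZ, hp]

-- core invariant: the fold over a strictly increasing nonempty index list yields (target, best)
theorem foldNZ_spec : ∀ (L : List Int), L.Pairwise (· < ·) → L ≠ [] →
    L.foldl pvStepNZ ((-1 : Int), (0 : Int)) = (pvTgt L, pvBst L (pvTgt L)) := by
  intro L
  induction L using List.reverseRecOn with
  | nil => intro _ h; exact absurd rfl h
  | append_singleton L m ih =>
    intro hpw _
    have hpwL : L.Pairwise (· < ·) := hpw.sublist (by simp)
    have hlt : ∀ y ∈ L, y < m := by
      intro y hy
      have := List.pairwise_append.mp hpw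
      exact this.2.2 y hy m (by simp)
    cases L with
    | nil =>
      simp only [List.nil_append, List.foldl_cons, List.foldl_nil]
      have h0 : pvStepNZ ((-1 : Int), (0 : Int)) m = (pvPc m, m) := by
        unfold pvStepNZ
        rw [if_pos (Or.inl (by have := pvPc_nonneg m; omega))]
      rw [h0]
      have ht : pvTgt [m] = pvPc m := by simp [pvTgt, pvMaxInt]
      have hb : pvBst [m] (pvPc m) = m := pvBst_append_eq ([] : List Int) m rfl (by simp)
      rw [ht, hb]
    | cons m0 rest =>
      rw [List.foldl_append, ih hpwL (by simp), List.foldl_cons, List.foldl_nil]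
      set L' := m0 :: rest with hL'
      have hTle : ∀ y ∈ L', pvPc y ≤ pvTgt L' := fun y hy => pvTgt_le hy
      have hBm := pvBst_mem (pvTgt_attained (L := L') (by simp [hL']))
      rcases lt_trichotomy (pvPc m) (pvTgt L') with hlt' | heq | hgt
      · -- pc m < target: step does nothing, filter unchanged
        have hstep : pvStepNZ (pvTgt L', pvBst L' (pvTgt L')) m = (pvTgt L', pvBst L' (pvTgt L')) := by
          unfold pvStepNZ
          rw [if_neg]
          simp only [not_or]
          constructor
          · omega
          · rintro ⟨h1, _⟩; omega
        rw [hstep, pvTgt_append]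
        have hmax : max (pvTgt L') (pvPc m) = pvTgt L' := by omega
        rw [hmax, pvBst_append_ne L' m (by omega)]
      · -- pc m = target: new best is m (it beats every earlier index)
        have hstep : pvStepNZ (pvTgt L', pvBst L' (pvTgt L')) m = (pvPc m, m) := by
          unfold pvStepNZ
          rw [if_pos (Or.inr ⟨heq, hlt _ hBm.1⟩)]
        rw [hstep, pvTgt_append]
        have hmax : max (pvTgt L') (pvPc m) = pvTgt L' := by omega
        rw [hmax, heq, pvBst_append_eq L' m heq hlt]
      · -- pc m > target: new weight and best are m's
        have hstep : pvStepNZ (pvTgt L', pvBst L' (pvTgt L')) m = (pvPc m, m) := by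
          unfold pvStepNZ
          rw [if_pos (Or.inl hgt)]
        rw [hstep, pvTgt_append]
        have hmax : max (pvTgt L') (pvPc m) = pvPc m := by omega
        rw [hmax, pvBst_append_eq L' m rfl hlt]

theorem filterMap_fst_pairwise (l : List (Int × Int))
    (h : l.Pairwise (fun p q => p.1 < q.1)) :
    (l.filterMap (fun p => if p.2 ≠ 0 then some p.1 else none)).Pairwise (· < ·) := by
  induction l with
  | nil => simp
  | cons p l ih =>
    rw [List.pairwise_cons] at h
    rw [List.filterMap_cons]
    by_cases hp : p.2 = 0
    · simp only [hp]; simpa using ih h.2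
    · simp only [if_pos (by simp [hp] : p.2 ≠ 0)]
      rw [List.pairwise_cons]
      refine ⟨?_, ih h.2⟩
      intro b hb
      rcases List.mem_filterMap.mp hb with ⟨q, hq, hqb⟩
      by_cases hq2 : q.2 = 0
      · simp [hq2] at hqb
      · simp only [if_pos (by simp [hq2] : q.2 ≠ 0), Option.some_inj] at hqb
        subst hqb
        exact h.1 q hq

theorem nonzero_pairwise (coeffs : List Int) :
    ((PySem.List.enumerate coeffs 0).filterMap (fun p => if p.2 ≠ 0 then some p.1 else none)).Pairwise (· < ·) :=
  filterMap_fst_pairwise _ (PySem.List.pairwise_lt_enumerate coeffs 0)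

-- ===== VERDICT (by name: the statement is the Claim_ definition above) =====
theorem get_max_weight_mask_spec : Claim_equal_get_max_weight_mask := by
  intro coeffs _
  unfold Spec_get_max_weight_mask get_max_weight_mask get_max_weight_mask_alt
  rw [foldA_eq_foldNZ]
  cases hN : (PySem.List.enumerate coeffs 0).filterMap (fun p => if p.2 ≠ 0 then some p.1 else none) with
  | nil => rfl
  | cons m0 rest =>
    have hpw := nonzero_pairwise coeffs
    rw [hN] at hpw
    rw [foldNZ_spec _ hpw (by simp)]
    simp [pvTgt]
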